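-- pv_equiv track=rewrite | github.com/Tanmay337442/percolationmagnet | main3.py | zdfs
-- ===== SOURCE A (Python) =====
-- z_diagonal_directions = [(0, 1, 1),
--             (1, 0, 1),
--             (-1, 0, 1),
--             (0, -1, 1),
--             (1, 1, 0),
--             (-1, 1, 0),
--             (1, -1, 0),
--             (-1, -1, 0),
--             (0, 1, -1),
--             (0, -1, -1),
--             (1, 0, -1),
--             (-1, 0, -1),
--             ]
--
-- def zdfs(array, size, current, visited, value):
--     x, y, z = current
--     visited[x][y][z] = True
--     if z == size - 1:
--         return [current]
--     for dx, dy, dz in z_diagonal_directions: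
--             nx, ny, nz = (x + dx) % size, (y + dy) % size, z + dz
--
--             if nz > 0 and array[nx][ny][nz] == value and not visited[nx][ny][nz]:
--                 prev = zdfs(array, size, (nx, ny, nz), visited, value)
--                 if prev:
--                     return [current] + prev
-- ===== SOURCE B (Python) =====
-- z_diagonal_directions = [(0, 1, 1), (1, 0, 1), (-1, 0, 1), (0, -1, 1), (1, 1, 0), (-1, 1, 0),
--                          (1, -1, 0), (-1, -1, 0), (0, 1, -1), (0, -1, -1), (1, 0, -1), (-1, 0, -1)]
--
-- def zdfs(array, size, current, visited, value):
--     # iterative DFS with an explicit stack of (node, remaining-directions) frames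
--     x, y, z = current
--     visited[x][y][z] = True
--     if z == size - 1:
--         return [current]
--     stack = [(current, z_diagonal_directions)]
--     while stack:
--         node, dirs = stack[-1]
--         if not dirs:
--             stack.pop()
--             continue
--         stack[-1] = (node, dirs[1:])
--         dx, dy, dz = dirs[0]
--         cx, cy, cz = node
--         nx, ny, nz = (cx + dx) % size, (cy + dy) % size, cz + dz
--         if nz > 0 and array[nx][ny][nz] == value and not visited[nx][ny][nz]:
--             visited[nx][ny][nz] = True
--             if nz == size - 1:
--                 return [n for n, _ in stack] + [(nx, ny, nz)]
--             stack.append(((nx, ny, nz), z_diagonal_directions))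
--     return None
-- ===== Notes on version B (the rewrite author's own statement) =====
-- stated objective: alternative
-- what changed: A's recursive DFS is replaced by an iterative DFS over an explicit stack of (node, remaining-directions) frames that reproduces the same left-to-right visit order, the same in-place visited marking, and the same first-found path.
import Mathlib
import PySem

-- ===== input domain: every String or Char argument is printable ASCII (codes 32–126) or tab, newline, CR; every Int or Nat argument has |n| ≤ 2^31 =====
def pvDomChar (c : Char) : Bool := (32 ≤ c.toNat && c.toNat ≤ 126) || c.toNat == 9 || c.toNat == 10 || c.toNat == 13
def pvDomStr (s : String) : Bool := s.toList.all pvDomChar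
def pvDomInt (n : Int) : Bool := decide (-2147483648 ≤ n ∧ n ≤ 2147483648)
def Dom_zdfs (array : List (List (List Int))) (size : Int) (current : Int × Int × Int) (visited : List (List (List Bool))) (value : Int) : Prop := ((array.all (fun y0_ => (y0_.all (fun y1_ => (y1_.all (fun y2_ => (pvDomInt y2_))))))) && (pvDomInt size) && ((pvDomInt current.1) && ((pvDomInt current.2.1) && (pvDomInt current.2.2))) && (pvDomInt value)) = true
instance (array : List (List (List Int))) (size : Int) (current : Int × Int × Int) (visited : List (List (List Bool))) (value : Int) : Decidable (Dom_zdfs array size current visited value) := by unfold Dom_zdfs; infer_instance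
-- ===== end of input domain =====

-- B replaces A's recursive DFS by an explicit-stack iterative DFS (same visit order, same return value;
-- both A and B mutate `visited` in place identically in Python — the theorems below are about the return value).

-- Shared helpers (both Pythons contain these very expressions): the module constant
-- z_diagonal_directions, Python's nested subscript read/write, the neighbour guard,
-- and the fuel bound (an artifact of the ports: each recursive call / push marks a
-- distinct unvisited cell, so #cells + 1 steps of fuel are never exhausted).
def zdirs : List (Int × Int × Int) :=
  [(0, 1, 1), (1, 0, 1), (-1, 0, 1), (0, -1, 1), (1, 1, 0), (-1, 1, 0),
   (1, -1, 0), (-1, -1, 0), (0, 1, -1), (0, -1, -1), (1, 0, -1), (-1, 0, -1)]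

-- xs[i][j][k] read with Python index semantics (none = IndexError, excluded by Pre_)
def get3 {α : Type} (xs : List (List (List α))) (i j k : Int) : Option α :=
  match PySem.List.pyGet? xs i with
  | none => none
  | some p =>
    match PySem.List.pyGet? p j with
    | none => none
    | some r => PySem.List.pyGet? r k

-- visited[i][j][k] = b with Python index semantics (out of range = IndexError, excluded by Pre_)
def set3 (vs : List (List (List Bool))) (i j k : Int) (b : Bool) : List (List (List Bool)) :=
  PySem.List.pySetD vs i
    (PySem.List.pySetD (PySem.List.pyGetD vs i []) j
      (PySem.List.pySetD (PySem.List.pyGetD (PySem.List.pyGetD vs i []) j []) k b))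

-- 'nz > 0 and array[nx][ny][nz] == value and not visited[nx][ny][nz]'
def zguard (array : List (List (List Int))) (vis : List (List (List Bool))) (nx ny nz value : Int) : Bool :=
  decide (0 < nz) && (get3 array nx ny nz == some value) && (get3 vis nx ny nz == some false)

def fuel3 (vs : List (List (List Bool))) : Nat :=
  (vs.map (fun p => (p.map List.length).sum)).sum + 1

-- ===== PORT A =====
-- A's recursion, with the mutated `visited` and the remaining fuel threaded through the return value.
mutual
def zdfsA (array : List (List (List Int))) (size value : Int) :
    Nat → (Int × Int × Int) → List (List (List Bool)) →
    Option (List (Int × Int × Int)) × List (List (List Bool)) × Nat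
  | fuel, (x, y, z), vis =>
    let vis' := set3 vis x y z true
    if z = size - 1 then (some [(x, y, z)], vis', fuel)
    else zloopA array size value fuel zdirs (x, y, z) vis'
  termination_by fuel => (fuel, zdirs.length + 2)

-- the 'for dx, dy, dz in z_diagonal_directions' loop of A
def zloopA (array : List (List (List Int))) (size value : Int) :
    Nat → List (Int × Int × Int) → (Int × Int × Int) → List (List (List Bool)) →
    Option (List (Int × Int × Int)) × List (List (List Bool)) × Nat
  | fuel, [], _, vis => (none, vis, fuel)
  | fuel, (dx, dy, dz) :: ds, (x, y, z), vis =>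
    let nx := PySem.Int.mod (x + dx) size
    let ny := PySem.Int.mod (y + dy) size
    let nz := z + dz
    if zguard array vis nx ny nz value then
      match fuel with
      | 0 => (none, vis, 0)  -- fuel guard only; never reached under Pre_
      | f + 1 =>
        match zdfsA array size value f (nx, ny, nz) vis with
        | (some p, v2, f2) =>
          if p = [] then zloopA array size value (min f2 f) ds (x, y, z) v2  -- 'if prev:' falsy; min is a no-op (f2 ≤ f)
          else (some ((x, y, z) :: p), v2, f2)
        | (none, v2, f2) => zloopA array size value (min f2 f) ds (x, y, z) v2
    else zloopA array size value fuel ds (x, y, z) vis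
  termination_by fuel ds => (fuel, ds.length + 1)
end

def zdfs (array : List (List (List Int))) (size : Int) (current : Int × Int × Int) (visited : List (List (List Bool))) (value : Int) : Option (List (Int × Int × Int)) :=
  (zdfsA array size value (fuel3 visited) current visited).1

-- ===== PORT B =====
-- the 'while stack:' loop of B; the stack is head-first (head = Python's stack[-1])
def zrunB (array : List (List (List Int))) (size value : Int) :
    Nat → List ((Int × Int × Int) × List (Int × Int × Int)) → List (List (List Bool)) →
    Option (List (Int × Int × Int)) × List (List (List Bool))
  | _, [], vis => (none, vis)
  | fuel, (_, []) :: rest, vis => zrunB array size value fuel rest vis  -- stack.pop()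
  | fuel, ((x, y, z), (dx, dy, dz) :: ds) :: rest, vis =>
    let nx := PySem.Int.mod (x + dx) size
    let ny := PySem.Int.mod (y + dy) size
    let nz := z + dz
    if zguard array vis nx ny nz value then
      match fuel with
      | 0 => (none, vis)  -- fuel guard only; never reached under Pre_
      | f + 1 =>
        let v2 := set3 vis nx ny nz true
        if nz = size - 1 then
          (some ((((x, y, z), ds) :: rest).reverse.map Prod.fst ++ [(nx, ny, nz)]), v2)
        else zrunB array size value f (((nx, ny, nz), zdirs) :: ((x, y, z), ds) :: rest) v2
    else zrunB array size value fuel (((x, y, z), ds) :: rest) vis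
  termination_by fuel st => (fuel, (st.map (fun fr => fr.2.length + 1)).sum)

def zdfs_alt (array : List (List (List Int))) (size : Int) (current : Int × Int × Int) (visited : List (List (List Bool))) (value : Int) : Option (List (Int × Int × Int)) :=
  match current with
  | (x, y, z) =>
    let vis' := set3 visited x y z true
    if z = size - 1 then some [(x, y, z)]
    else (zrunB array size value (fuel3 visited) [((x, y, z), zdirs)] vis').1

-- ===== PRECONDITION & SPEC =====
-- Pre_ excludes inputs where A raises (IndexError from the visited assignment or the neighbour reads,
-- ZeroDivisionError from '% size'): the start assignment must be in range, and the search must be safe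
-- because it stops at once (z = size - 1), never passes the 'nz > 0' guard (z ≤ -1), or runs on grids
-- whose every dimension is ≥ size with the start inside [-size, size); a few shape-lax inputs whose run
-- happens never to touch a missing cell still return in A (B returns the same there).
def Pre_zdfs (array : List (List (List Int))) (size : Int) (current : Int × Int × Int) (visited : List (List (List Bool))) (value : Int) : Prop :=
  (-(visited.length : Int) ≤ current.1 ∧ current.1 < (visited.length : Int)) ∧
  (-((PySem.List.pyGetD visited current.1 []).length : Int) ≤ current.2.1 ∧
    current.2.1 < ((PySem.List.pyGetD visited current.1 []).length : Int)) ∧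
  (-((PySem.List.pyGetD (PySem.List.pyGetD visited current.1 []) current.2.1 []).length : Int) ≤ current.2.2 ∧
    current.2.2 < ((PySem.List.pyGetD (PySem.List.pyGetD visited current.1 []) current.2.1 []).length : Int)) ∧
  (current.2.2 = size - 1 ∨
   (size ≠ 0 ∧ current.2.2 ≤ -1) ∨
   (1 ≤ size ∧
    size ≤ (array.length : Int) ∧
    (∀ p ∈ array, size ≤ (p.length : Int) ∧ ∀ r ∈ p, size ≤ (r.length : Int)) ∧
    size ≤ (visited.length : Int) ∧
    (∀ p ∈ visited, size ≤ (p.length : Int) ∧ ∀ r ∈ p, size ≤ (r.length : Int)) ∧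
    (-size ≤ current.1 ∧ current.1 < size) ∧
    (-size ≤ current.2.1 ∧ current.2.1 < size) ∧
    (-size ≤ current.2.2 ∧ current.2.2 < size)))
instance (array : List (List (List Int))) (size : Int) (current : Int × Int × Int) (visited : List (List (List Bool))) (value : Int) : Decidable (Pre_zdfs array size current visited value) := by unfold Pre_zdfs; infer_instance

def pvWitness_zdfs : List (List (List Int)) × Int × (Int × Int × Int) × List (List (List Bool)) × Int :=
  ([[[1, 0], [0, 1]], [[0, 1], [1, 0]]], 2, (0, 0, 0), [[[false, false], [false, false]], [[false, false], [false, false]]], 1)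

def Spec_zdfs (array : List (List (List Int))) (size : Int) (current : Int × Int × Int) (visited : List (List (List Bool))) (value : Int) (out : Option (List (Int × Int × Int))) : Prop := out = zdfs_alt array size current visited value
instance (array : List (List (List Int))) (size : Int) (current : Int × Int × Int) (visited : List (List (List Bool))) (value : Int) (out : Option (List (Int × Int × Int))) : Decidable (Spec_zdfs array size current visited value out) := by unfold Spec_zdfs; infer_instance

-- ===== CLAIM (what is proved, stated in full; the proofs are below) =====
def Claim_equal_zdfs : Prop := ∀ (array : List (List (List Int))) (size : Int) (current : Int × Int × Int) (visited : List (List (List Bool))) (value : Int), Dom_zdfs array size current visited value → Pre_zdfs array size current visited value → Spec_zdfs array size current visited value (zdfs array size current visited value)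

-- ===== LEMMAS AND PROOFS =====

-- A-side interpretation of a whole stack: run the direction loop of the top frame; on success
-- prefix the nodes of the frames below; on failure pop and continue with the leftover fuel.
def zstackRun (array : List (List (List Int))) (size value : Int) :
    Nat → List ((Int × Int × Int) × List (Int × Int × Int)) → List (List (List Bool)) →
    Option (List (Int × Int × Int)) × List (List (List Bool)) × Nat
  | fuel, [], vis => (none, vis, fuel)
  | fuel, (cur, ds) :: rest, vis =>
    match zloopA array size value fuel ds cur vis with
    | (some p, v2, f2) => (some (rest.reverse.map Prod.fst ++ p), v2, f2)
    | (none, v2, f2) => zstackRun array size value f2 rest v2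

lemma zloopA_zero (array : List (List (List Int))) (size value : Int)
    (ds : List (Int × Int × Int)) (cur : Int × Int × Int) (vis : List (List (List Bool))) :
    zloopA array size value 0 ds cur vis = (none, vis, 0) := by
  induction ds generalizing vis with
  | nil => simp [zloopA]
  | cons d ds ih =>
    obtain ⟨dx, dy, dz⟩ := d; obtain ⟨x, y, z⟩ := cur
    simp only [zloopA]
    split
    · rfl
    · exact ih vis

lemma zstackRun_zero (array : List (List (List Int))) (size value : Int)
    (st : List ((Int × Int × Int) × List (Int × Int × Int))) (vis : List (List (List Bool))) :
    zstackRun array size value 0 st vis = (none, vis, 0) := by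
  induction st generalizing vis with
  | nil => rfl
  | cons fr rest ih => simp [zstackRun, zloopA_zero, ih]

-- fuel never increases, and a successful result is never the empty path
lemma zdfsA_bound_nonempty (array : List (List (List Int))) (size value : Int) :
    ∀ fuel,
      (∀ cur vis, (zdfsA array size value fuel cur vis).2.2 ≤ fuel ∧
        ∀ p, (zdfsA array size value fuel cur vis).1 = some p → p ≠ []) ∧
      (∀ ds cur vis, (zloopA array size value fuel ds cur vis).2.2 ≤ fuel ∧
        ∀ p, (zloopA array size value fuel ds cur vis).1 = some p → p ≠ []) := by
  intro fuel
  induction fuel using Nat.strong_induction_on with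
  | _ fuel IH =>
    have hloop : ∀ ds cur vis, (zloopA array size value fuel ds cur vis).2.2 ≤ fuel ∧
        ∀ p, (zloopA array size value fuel ds cur vis).1 = some p → p ≠ [] := by
      intro ds
      induction ds with
      | nil => intro cur vis; simp [zloopA]
      | cons d ds ihds =>
        intro cur vis
        obtain ⟨dx, dy, dz⟩ := d; obtain ⟨x, y, z⟩ := cur
        cases fuel with
        | zero => simp [zloopA_zero]
        | succ f =>
          simp only [zloopA]
          split
          · -- guard true
            rcases hA : zdfsA array size value f
                (PySem.Int.mod (x + dx) size, PySem.Int.mod (y + dy) size, z + dz) vis with ⟨r, v2, f2⟩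
            have hf2 : f2 ≤ f := by
              have := (IH f (by omega)).1
                (PySem.Int.mod (x + dx) size, PySem.Int.mod (y + dy) size, z + dz) vis
              rw [hA] at this; exact this.1
            cases r with
            | some p =>
              by_cases hp : p = []
              · simp only [hp, reduceIte]
                have h2 := (IH (min f2 f) (by omega)).2 ds (x, y, z) v2
                exact ⟨le_trans h2.1 (by omega), h2.2⟩
              · simp only [if_neg hp]
                exact ⟨by omega, by intro q hq; cases hq; simp⟩
            | none =>
              have h2 := (IH (min f2 f) (by omega)).2 ds (x, y, z) v2
              exact ⟨le_trans h2.1 (by omega), h2.2⟩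
          · exact ihds (x, y, z) vis
    refine ⟨?_, hloop⟩
    intro cur vis
    obtain ⟨x, y, z⟩ := cur
    simp only [zdfsA]
    split
    · exact ⟨le_rfl, by intro p hp; cases hp; simp⟩
    · exact hloop zdirs (x, y, z) _

-- main simulation: the stack machine computes exactly the A-side interpretation of its stack
lemma zrunB_eq_zstackRun (array : List (List (List Int))) (size value : Int) :
    ∀ fuel st vis,
      zrunB array size value fuel st vis =
        ((zstackRun array size value fuel st vis).1, (zstackRun array size value fuel st vis).2.1) := by
  intro fuel st vis
  fun_induction zrunB array size value fuel st vis with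
  | case1 vis => rfl
  | case2 fuel cur rest vis ih =>
    -- pop: the exhausted frame contributes (none, vis, fuel)
    simp only [zstackRun, zloopA] at *
    exact ih
  | case3 x y z dx dy dz ds rest vis nx ny nz hg =>
    simp [zstackRun, zloopA_zero, zstackRun_zero]
  | case4 x y z dx dy dz ds rest vis nx ny nz hg f v2 hsz =>
    -- guard true, neighbour at the top layer: success
    have hg' : zguard array vis (PySem.Int.mod (x + dx) size) (PySem.Int.mod (y + dy) size) (z + dz) value = true := hg
    have hsz' : z + dz = size - 1 := hsz
    have hg'' : zguard array vis (PySem.Int.mod (x + dx) size) (PySem.Int.mod (y + dy) size) (size - 1) value = true := hsz' ▸ hg'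
    simp [zstackRun, zloopA, zdfsA, hg'', hsz']
    exact ⟨⟨rfl, rfl, hsz'⟩, by rw [← hsz']⟩
  | case5 x y z dx dy dz ds rest vis nx ny nz hg f v2 hsz ih =>
    -- guard true, neighbour pushed on the stack
    have hg' : zguard array vis (PySem.Int.mod (x + dx) size) (PySem.Int.mod (y + dy) size) (z + dz) value = true := hg
    have hsz' : ¬ (z + dz = size - 1) := hsz
    rw [ih]
    simp only [zstackRun, zloopA, zdfsA, hg', hsz', if_true, if_false]
    rcases hL : zloopA array size value f zdirs
        (PySem.Int.mod (x + dx) size, PySem.Int.mod (y + dy) size, z + dz)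
        (set3 vis (PySem.Int.mod (x + dx) size) (PySem.Int.mod (y + dy) size) (z + dz) true) with ⟨r, v3, f3⟩
    have hb := (zdfsA_bound_nonempty array size value f).2 zdirs
        (PySem.Int.mod (x + dx) size, PySem.Int.mod (y + dy) size, z + dz)
        (set3 vis (PySem.Int.mod (x + dx) size) (PySem.Int.mod (y + dy) size) (z + dz) true)
    rw [hL] at hb
    cases r with
    | some p =>
      have hp : p ≠ [] := hb.2 p rfl
      simp [hp]
    | none => simp only [min_eq_left hb.1]
  | case6 fuel x y z dx dy dz ds rest vis nx ny nz hg ih =>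
    -- guard false: skip the direction
    have hg' : ¬ (zguard array vis (PySem.Int.mod (x + dx) size) (PySem.Int.mod (y + dy) size) (z + dz) value = true) := hg
    rw [ih]
    cases fuel with
    | zero => simp [zstackRun, zloopA_zero, zstackRun_zero]
    | succ f =>
      simp only [zstackRun, zloopA, hg']
      rcases hL2 : zloopA array size value (f + 1) ds (x, y, z) vis with ⟨r2, v4, f4⟩
      cases r2 <;> simp

-- ===== VERDICT (by name: the statement is the Claim_ definition above) =====
theorem zdfs_spec : Claim_equal_zdfs := by
  intro array size current visited value _ _
  unfold Spec_zdfs zdfs zdfs_alt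
  obtain ⟨x, y, z⟩ := current
  simp only [zdfsA]
  by_cases hz : z = size - 1
  · simp [hz]
  · simp only [if_neg hz]
    rw [zrunB_eq_zstackRun]
    simp only [zstackRun]
    rcases hL : zloopA array size value (fuel3 visited) zdirs (x, y, z)
        (set3 visited x y z true) with ⟨r, v2, f2⟩
    cases r <;> simp [zstackRun]
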